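-- pv_equiv track=rewrite | github.com/ardonplay/eyazis-2 | LR3/methods.py | sort_sentences
-- ===== SOURCE A (Python) =====
-- def sort_sentences(original, output):
--     sorted_sent_arr = []
--     sorted_output = []
--     for i in range(0, len(output)):
--         if output[i] in original:
--             sorted_sent_arr.append(original.index(output[i]))
--     sorted_sent_arr = sorted(sorted_sent_arr)
--
--     for i in range(0, len(sorted_sent_arr)):
--         sorted_output.append(original[sorted_sent_arr[i]])
--     return sorted_output
-- ===== SOURCE B (Python) =====
-- def sort_sentences(original, output):
--     counts = {}
--     for s in output:
--         counts[s] = counts.get(s, 0) + 1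
--     result = []
--     seen = set()
--     for s in original:
--         if s not in seen:
--             seen.add(s)
--             result.extend([s] * counts.get(s, 0))
--     return result
-- ===== Notes on version B (the rewrite author's own statement) =====
-- stated objective: faster
-- what changed: B drops A's collect-indices/sort/re-index pipeline entirely: it builds a count dict over output in one pass, then walks original in order once (with a seen set) emitting each first-occurrence value count times, so no sort and no repeated .index/'in' scans over original.
import Mathlib
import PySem

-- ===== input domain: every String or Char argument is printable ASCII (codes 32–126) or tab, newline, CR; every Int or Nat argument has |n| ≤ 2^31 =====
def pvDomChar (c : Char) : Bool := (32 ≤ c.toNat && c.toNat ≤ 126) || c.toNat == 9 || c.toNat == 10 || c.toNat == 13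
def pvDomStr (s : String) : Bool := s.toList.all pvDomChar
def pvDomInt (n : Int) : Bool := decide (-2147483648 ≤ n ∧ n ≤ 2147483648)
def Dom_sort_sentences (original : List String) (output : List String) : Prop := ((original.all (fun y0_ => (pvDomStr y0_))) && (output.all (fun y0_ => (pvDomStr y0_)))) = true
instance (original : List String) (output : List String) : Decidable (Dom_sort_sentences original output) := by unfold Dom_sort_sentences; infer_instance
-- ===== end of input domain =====

-- B replaces A's collect-indices/sort/re-index pipeline with a single sort-free pass over
-- `original` (a count dict over `output` plus a `seen` set); same return value, no sort.

-- ===== PORT A =====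
-- The `.getD 0` / `.getD ""` defaults are never taken: `index?` is guarded by membership,
-- and every sorted index is a valid nonnegative position of `original`.
def sort_sentences (original : List String) (output : List String) : List String :=
  let sorted_sent_arr : List Int := output.foldl
    (fun acc s => if s ∈ original then acc ++ [(((PySem.List.index? original s).getD 0 : Nat) : Int)] else acc) []
  let sorted_sent_arr := PySem.List.sorted sorted_sent_arr (fun x => x) false
  sorted_sent_arr.foldl (fun acc j => acc ++ [(PySem.List.pyGet? original j).getD ""]) []

-- ===== PORT B =====
def sort_sentences_alt (original : List String) (output : List String) : List String :=
  let counts : PySem.Dict String Int := output.foldl (fun d s => d.modify s 0 (fun c => c + 1)) PySem.Dict.empty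
  (original.foldl
    (fun (acc : List String × PySem.Set String) s =>
      if s ∈ acc.2 then acc
      else (acc.1 ++ List.replicate (counts.getD s 0).toNat s, acc.2.add s))
    ([], PySem.Set.ofList [])).1

-- ===== PRECONDITION & SPEC =====
def Spec_sort_sentences (original : List String) (output : List String) (out : List String) : Prop := out = sort_sentences_alt original output
instance (original : List String) (output : List String) (out : List String) : Decidable (Spec_sort_sentences original output out) := by unfold Spec_sort_sentences; infer_instance

-- ===== CLAIM (what is proved, stated in full; the proofs are below) =====
def Claim_equal_sort_sentences : Prop := ∀ (original : List String) (output : List String), Dom_sort_sentences original output → Spec_sort_sentences original output (sort_sentences original output)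

-- ===== LEMMAS AND PROOFS =====

-- B's second loop, as a recursive specification: for each not-yet-seen element of `l`,
-- `cnt` copies of it, in order.
def blSpec (cnt : String → Nat) : List String → PySem.Set String → List String
  | [], _ => []
  | s :: rest, seen =>
    if s ∈ seen then blSpec cnt rest seen
    else List.replicate (cnt s) s ++ blSpec cnt rest (seen.add s)

theorem foldl_blSpec (cnt : String → Nat) (l : List String) (acc : List String) (seen : PySem.Set String) :
    (l.foldl (fun (p : List String × PySem.Set String) s =>
        if s ∈ p.2 then p else (p.1 ++ List.replicate (cnt s) s, p.2.add s)) (acc, seen)).1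
      = acc ++ blSpec cnt l seen := by
  induction l generalizing acc seen with
  | nil => simp [blSpec]
  | cons s rest ih =>
    by_cases hs : s ∈ seen
    · simp [blSpec, hs, ih]
    · simp [blSpec, hs, ih]

theorem count_blSpec (cnt : String → Nat) (l : List String) (seen : PySem.Set String) (t : String) :
    List.count t (blSpec cnt l seen) = if t ∈ l ∧ t ∉ seen then cnt t else 0 := by
  induction l generalizing seen with
  | nil => simp [blSpec]
  | cons s rest ih =>
    by_cases hs : s ∈ seen
    · rw [blSpec, if_pos hs, ih]
      by_cases ht : t = s
      · subst ht; simp [hs]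
      · simp [ht]
    · rw [blSpec, if_neg hs]
      rw [List.count_append, List.count_replicate, ih]
      by_cases ht : t = s
      · subst ht; simp [hs]
      · have hts : ¬ s = t := fun e => ht e.symm
        simp [ht, hts, PySem.Set.mem_add]

theorem mem_blSpec (cnt : String → Nat) (l : List String) (seen : PySem.Set String) (t : String)
    (h : t ∈ blSpec cnt l seen) : t ∈ l ∧ t ∉ seen := by
  have hc := List.count_pos_iff.mpr h
  rw [count_blSpec] at hc
  by_cases hm : t ∈ l ∧ t ∉ seen
  · exact hm
  · rw [if_neg hm] at hc; omega

theorem index?_eq_idxOf (xs : List String) (v : String) (h : v ∈ xs) :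
    PySem.List.index? xs v = some (xs.idxOf v) := by
  induction xs with
  | nil => simp at h
  | cons x t ih =>
    by_cases hv : x = v
    · subst hv; simp [PySem.List.index?, List.idxOf?_cons, List.idxOf_cons_self]
    · have hm : v ∈ t := by
        rcases List.mem_cons.mp h with e | hm
        · exact absurd e.symm hv
        · exact hm
      simp only [PySem.List.index?] at *
      rw [List.idxOf?_cons, List.idxOf_cons_ne t hv, ih hm]
      simp [hv, Nat.succ_eq_add_one]

theorem blSpec_pairwise (cnt : String → Nat) (orig : List String) :
    ∀ (l : List String) (seen : PySem.Set String) (pre : List String),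
      orig = pre ++ l → (∀ x ∈ pre, x ∈ seen) →
      (blSpec cnt l seen).Pairwise (fun a b => orig.idxOf a ≤ orig.idxOf b) := by
  intro l
  induction l with
  | nil => intro seen pre _ _; simp [blSpec]
  | cons s rest ih =>
    intro seen pre horig hpre
    by_cases hs : s ∈ seen
    · rw [blSpec, if_pos hs]
      refine ih seen (pre ++ [s]) (by simp [horig]) ?_
      intro x hx
      rcases List.mem_append.mp hx with hx | hx
      · exact hpre x hx
      · simp at hx; rw [hx]; exact hs
    · rw [blSpec, if_neg hs]
      apply List.pairwise_append.mpr
      refine ⟨List.pairwise_replicate.mpr (Or.inr le_rfl), ?_, ?_⟩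
      · refine ih (seen.add s) (pre ++ [s]) (by simp [horig]) ?_
        intro x hx
        rcases List.mem_append.mp hx with hx | hx
        · exact (PySem.Set.mem_add seen s x).mpr (Or.inl (hpre x hx))
        · simp at hx; exact (PySem.Set.mem_add seen s x).mpr (Or.inr hx)
      · intro a ha b hb
        have haeq : a = s := List.eq_of_mem_replicate ha
        subst haeq
        have hb' := mem_blSpec cnt rest (seen.add a) b hb
        have hbne : b ≠ a := by
          intro e; exact hb'.2 ((PySem.Set.mem_add seen a b).mpr (Or.inr e))
        have hbseen : b ∉ seen := fun e => hb'.2 ((PySem.Set.mem_add seen a b).mpr (Or.inl e))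
        have hanp : a ∉ pre := fun e => hs (hpre a e)
        have hbnp : b ∉ pre := fun e => hbseen (hpre b e)
        subst horig
        rw [List.idxOf_append, if_neg hanp, List.idxOf_append, if_neg hbnp,
            List.idxOf_cons_self, List.idxOf_cons_ne rest (Ne.symm hbne)]
        omega

-- B's count dict reads back as List.count over output.
theorem counts_getD (output : List String) (s : String) :
    ((output.foldl (fun d t => d.modify t 0 (fun c => c + 1)) (PySem.Dict.empty : PySem.Dict String Int)).getD s 0).toNat
      = output.count s := by
  rw [PySem.Dict.getD_foldl_modify_add_one]
  simp [pysem]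

theorem blSpec_perm (orig output : List String) :
    (blSpec (fun s => output.count s) orig (PySem.Set.ofList [])).Perm
      (output.filter (fun t => decide (t ∈ orig))) := by
  apply List.perm_iff_count.mpr
  intro t
  rw [count_blSpec]
  by_cases ht : t ∈ orig
  · rw [if_pos (by simp [ht])]
    rw [List.count_filter (by simp [ht])]
  · rw [if_neg (by simp [ht])]
    exact (List.count_eq_zero.mpr (by simp [ht])).symm

-- ===== VERDICT (by name: the statement is the Claim_ definition above) =====
theorem sort_sentences_spec : Claim_equal_sort_sentences := by
  intro original output _
  unfold Spec_sort_sentences sort_sentences sort_sentences_alt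
  simp only
  -- name the count function and rewrite B to blSpec
  rw [foldl_blSpec]
  have hcnt : (fun s => ((output.foldl (fun d t => d.modify t 0 (fun c => c + 1)) (PySem.Dict.empty : PySem.Dict String Int)).getD s 0).toNat)
      = fun s => output.count s := funext (counts_getD output)
  rw [hcnt]
  set bl := blSpec (fun s => output.count s) original (PySem.Set.ofList []) with hbl
  -- A's first loop is a filtered map of first indices
  have hA1 : (fun (acc : List Int) s => if s ∈ original then acc ++ [(((PySem.List.index? original s).getD 0 : Nat) : Int)] else acc)
      = (fun (acc : List Int) s => if (fun t => decide (t ∈ original)) s = true then acc ++ [(fun t => (((PySem.List.index? original t).getD 0 : Nat) : Int)) s] else acc) := by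
    funext acc s; by_cases h : s ∈ original <;> simp [h]
  rw [hA1, PySem.List.foldl_append_if (fun s => decide (s ∈ original))
        (fun s => (((PySem.List.index? original s).getD 0 : Nat) : Int)) output []]
  -- rewrite that map to idxOf on the members
  have hmapA : (output.filter (fun s => decide (s ∈ original))).map
        (fun s => (((PySem.List.index? original s).getD 0 : Nat) : Int))
      = (output.filter (fun s => decide (s ∈ original))).map
        (fun s => ((original.idxOf s : Nat) : Int)) := by
    apply List.map_congr_left
    intro s hsmem
    have hso : s ∈ original := by simpa using (List.mem_filter.mp hsmem).2
    rw [index?_eq_idxOf original s hso]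
    simp
  rw [List.nil_append, hmapA]
  -- the sorted index list equals bl's index image
  have hperm : (bl.map (fun s => ((original.idxOf s : Nat) : Int))).Perm
      ((output.filter (fun s => decide (s ∈ original))).map (fun s => ((original.idxOf s : Nat) : Int))) :=
    (blSpec_perm original output).map _
  have hpw : (bl.map (fun s => ((original.idxOf s : Nat) : Int))).Pairwise (fun a b => a ≤ b) := by
    apply List.pairwise_map.mpr
    have := blSpec_pairwise (fun s => output.count s) original original (PySem.Set.ofList []) [] rfl (by simp)
    exact this.imp (by intro a b h; exact_mod_cast h)
  rw [PySem.List.sorted_id_eq_of_perm_of_pairwise _ _ hperm hpw]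
  -- A's second loop maps indices back to the sentences themselves
  rw [PySem.List.foldl_append_singleton_eq_map (fun j => (PySem.List.pyGet? original j).getD "") _ []]
  rw [List.nil_append, List.map_map]
  conv_rhs => rw [← List.map_id bl]
  apply List.map_congr_left
  intro s hsbl
  have hso : s ∈ original := (mem_blSpec _ _ _ s hsbl).1
  have hlt : original.idxOf s < original.length := List.idxOf_lt_length_of_mem hso
  simp only [Function.comp]
  rw [PySem.List.pyGet?_natCast, List.getElem?_eq_getElem hlt]
  simp [List.getElem_idxOf hlt]
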